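-- pv_equiv track=rewrite | github.com/VcelistMC/Problem-Solving | CodeForces/Creep.py | solve
-- ===== SOURCE A (Python) =====
-- def solve(a, b):
--     binStr = ""
--     o = 0
--     z = 0
--     while a != 0 and b != 0:
--         str1 = binStr + "0"
--         str2 = binStr + "1"
--
--         score1 = abs((z+1) - o)
--         score2 = abs(z - (o+1))
--
--         if score1 < score2:
--             binStr = str1
--             a -= 1
--             z += 1
--         else:
--             binStr = str2
--             b -= 1
--             o += 1
--
--     if a != 0: binStr += ("0" * a)
--     if b != 0: binStr += ("1" * b)
--     return binStr
-- ===== SOURCE B (Python) =====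
-- def solve(a, b):
--     m = min(a, b)
--     return "10" * m + "0" * (a - m) + "1" * (b - m)
-- ===== Notes on version B (the rewrite author's own statement) =====
-- stated objective: faster
-- what changed: Replaces the per-character greedy scoring loop with a closed-form string build: m = min(a,b) copies of "10" followed by the leftover run of the larger side.
-- outside the precondition, e.g. on solve(-2, 3): A returns '10101', B returns '11111'; on solve(-1, -1): A does not finish within the time limit, B returns ''
import Mathlib
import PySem

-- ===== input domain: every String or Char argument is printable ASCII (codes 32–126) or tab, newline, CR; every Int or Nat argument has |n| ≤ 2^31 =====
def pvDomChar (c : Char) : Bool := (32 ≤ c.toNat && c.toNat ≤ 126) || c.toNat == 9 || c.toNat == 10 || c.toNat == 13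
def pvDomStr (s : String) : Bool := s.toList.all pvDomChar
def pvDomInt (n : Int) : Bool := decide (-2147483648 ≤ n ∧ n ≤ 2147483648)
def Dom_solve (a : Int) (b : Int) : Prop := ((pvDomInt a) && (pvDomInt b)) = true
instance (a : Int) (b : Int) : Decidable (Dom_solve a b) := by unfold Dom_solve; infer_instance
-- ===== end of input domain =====

-- B replaces A's per-character greedy scoring loop by the closed form "10"*min(a,b) + "0"*(a-min) + "1"*(b-min).

-- ===== PORT A =====
-- A's while-loop; the fuel 2*(|a|+|b|)+2 bounds the iteration count on every input where
-- the Python loop terminates (each pair of iterations decrements a or b towards 0).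
-- State: (a, b, z, o, binStr).
def solveLoop : Nat → Int → Int → Int → Int → List Char → Int × Int × List Char
  | 0, a, b, _, _, s => (a, b, s)
  | (f+1), a, b, z, o, s =>
    if a ≠ 0 ∧ b ≠ 0 then
      if ((z + 1) - o).natAbs < (z - (o + 1)).natAbs then
        solveLoop f (a - 1) b (z + 1) o (s ++ ['0'])
      else
        solveLoop f a (b - 1) z (o + 1) (s ++ ['1'])
    else (a, b, s)

def solve (a : Int) (b : Int) : String :=
  let r := solveLoop (2 * (a.natAbs + b.natAbs) + 2) a b 0 0 []
  let s1 := if r.1 ≠ 0 then r.2.2 ++ PySem.List.pyRepeat ['0'] r.1 else r.2.2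
  let s2 := if r.2.1 ≠ 0 then s1 ++ PySem.List.pyRepeat ['1'] r.2.1 else s1
  String.ofList s2

-- ===== PORT B =====
def solve_alt (a : Int) (b : Int) : String :=
  let m := min a b
  String.ofList (PySem.List.pyRepeat ['1', '0'] m ++
    PySem.List.pyRepeat ['0'] (a - m) ++ PySem.List.pyRepeat ['1'] (b - m))

-- ===== PRECONDITION & SPEC =====
-- Pre_ restricts to the task's natural domain, nonnegative counts of zeros and ones: with both
-- counts negative A's while-loop never terminates, and with one negative count A's returned
-- string (e.g. "10101" on (-2,3)) is an accident of which counter happens to reach zero.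
def Pre_solve (a : Int) (b : Int) : Prop := 0 ≤ a ∧ 0 ≤ b
instance (a : Int) (b : Int) : Decidable (Pre_solve a b) := by unfold Pre_solve; infer_instance
def pvWitness_solve : Int × Int := (2, 3)

def Spec_solve (a : Int) (b : Int) (out : String) : Prop := out = solve_alt a b
instance (a : Int) (b : Int) (out : String) : Decidable (Spec_solve a b out) := by unfold Spec_solve; infer_instance

-- ===== CLAIM (what is proved, stated in full; the proofs are below) =====
def Claim_equal_solve : Prop := ∀ (a : Int) (b : Int), Dom_solve a b → Pre_solve a b → Spec_solve a b (solve a b)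

-- ===== LEMMAS AND PROOFS =====

-- "10" repeated k times, the shape A's loop produces
def rep10 : Nat → List Char
  | 0 => []
  | k+1 => '1' :: '0' :: rep10 k

theorem rep10_succ_append (k : Nat) : rep10 (k + 1) = rep10 k ++ ['1', '0'] := by
  induction k with
  | zero => rfl
  | succ n ih => simpa [rep10] using ih

theorem pyRepeat_pair (m : Int) : PySem.List.pyRepeat (['1', '0'] : List Char) m = rep10 m.toNat := by
  unfold PySem.List.pyRepeat
  generalize m.toNat = k
  induction k with
  | zero => rfl
  | succ n ih => simp [List.replicate_succ, rep10, ih]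

theorem solveLoop_stop (fuel : Nat) (a b z o : Int) (s : List Char) (h : a = 0 ∨ b = 0) :
    solveLoop fuel a b z o s = (a, b, s) := by
  cases fuel with
  | zero => rfl
  | succ f =>
    simp only [solveLoop]
    rcases h with h | h <;> simp [h]

-- the loop invariant: starting at a balanced state (z = o) with min a b = m and 2*m fuel,
-- A's loop emits "10"-pairs until one side runs out (the last pair may be cut after its '1')
theorem solveLoop_run (m : Nat) : ∀ (fuel : Nat) (a b z : Int) (s : List Char),
    0 ≤ a → 0 ≤ b → min a b = (m : Int) → 2 * m ≤ fuel →
    solveLoop fuel a b z z s =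
      (if a = 0 ∨ b = 0 then (a, b, s)
       else if b ≤ a then (a - (b - 1), 0, s ++ rep10 (b - 1).toNat ++ ['1'])
       else (0, b - a, s ++ rep10 a.toNat)) := by
  induction m with
  | zero =>
    intro fuel a b z s ha hb hmin _
    have h0 : a = 0 ∨ b = 0 := by omega
    rw [solveLoop_stop fuel a b z z s h0]
    simp [h0]
  | succ n ih =>
    intro fuel a b z s ha hb hmin hfuel
    have hA : a ≠ 0 := by omega
    have hB : b ≠ 0 := by omega
    obtain ⟨f, rfl⟩ : ∃ f, fuel = f + 1 := ⟨fuel - 1, by omega⟩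
    simp only [solveLoop, hA, hB, ne_eq, not_false_eq_true, and_self, if_true]
    have hsc : ¬ ((z + 1) - z).natAbs < (z - (z + 1)).natAbs := by
      have e1 : (z + 1) - z = 1 := by ring
      have e2 : z - (z + 1) = -1 := by ring
      rw [e1, e2]; decide
    rw [if_neg hsc]
    by_cases hb1 : b = 1
    · -- after the first '1', b = 0 and the loop stops
      rw [solveLoop_stop f a (b - 1) z (z + 1) (s ++ ['1']) (Or.inr (by omega))]
      simp only [or_self, if_false]
      rw [if_pos (by omega : b ≤ a)]
      simp only [Prod.mk.injEq]
      refine ⟨by omega, by omega, ?_⟩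
      simp [show (b - 1).toNat = 0 by omega, rep10]
    · -- b ≥ 2: the '0' step follows, then the induction hypothesis applies
      have hb2 : 2 ≤ b := by omega
      obtain ⟨f', rfl⟩ : ∃ f', f = f' + 1 := ⟨f - 1, by omega⟩
      have hB' : b - 1 ≠ 0 := by omega
      simp only [solveLoop, hA, hB', ne_eq, not_false_eq_true, and_self, if_true]
      have hsc2 : ((z + 1) - (z + 1)).natAbs < (z - ((z + 1) + 1)).natAbs := by
        have e1 : (z + 1) - (z + 1) = 0 := by ring
        have e2 : z - ((z + 1) + 1) = -2 := by ring
        rw [e1, e2]; decide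
      rw [if_pos hsc2]
      rw [ih f' (a - 1) (b - 1) (z + 1) (s ++ ['1'] ++ ['0']) (by omega) (by omega)
        (by omega) (by omega)]
      simp only [or_self, if_false]
      by_cases hstop : a - 1 = 0 ∨ b - 1 = 0
      · -- then a = 1 (since b ≥ 2): the loop's next test fails on a
        rw [if_pos hstop, if_neg (by omega : ¬ b ≤ a)]
        simp only [Prod.mk.injEq]
        refine ⟨by omega, by omega, ?_⟩
        simp [show a.toNat = 1 by omega, rep10]
      · rw [if_neg hstop]
        by_cases hba : b ≤ a
        · rw [if_pos (by omega : b - 1 ≤ a - 1), if_pos hba]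
          have key : rep10 (b - 1).toNat = '1' :: '0' :: rep10 (b - 1 - 1).toNat := by
            have h : (b - 1).toNat = (b - 1 - 1).toNat + 1 := by omega
            rw [h]; rfl
          rw [key]
          simp only [Prod.mk.injEq]
          refine ⟨by omega, by trivial, by simp⟩
        · rw [if_neg (by omega : ¬ b - 1 ≤ a - 1), if_neg hba]
          have key : rep10 a.toNat = '1' :: '0' :: rep10 (a - 1).toNat := by
            have h : a.toNat = (a - 1).toNat + 1 := by omega
            rw [h]; rfl
          rw [key]
          simp only [Prod.mk.injEq]
          refine ⟨by trivial, by omega, by simp⟩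

-- ===== VERDICT (by name: the statement is the Claim_ definition above) =====
theorem solve_spec : Claim_equal_solve := by
  intro a b _ hpre
  obtain ⟨ha, hb⟩ := hpre
  unfold Spec_solve solve solve_alt
  have hmin : min a b = ((min a b).toNat : Int) := by omega
  have hfuel : 2 * (min a b).toNat ≤ 2 * (a.natAbs + b.natAbs) + 2 := by omega
  rw [solveLoop_run (min a b).toNat (2 * (a.natAbs + b.natAbs) + 2) a b 0 [] ha hb hmin hfuel]
  simp only [pyRepeat_pair, PySem.List.pyRepeat_singleton]
  by_cases h0 : a = 0 ∨ b = 0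
  · rcases h0 with rfl | rfl
    · -- a = 0 : result is "1"*b
      have hm : min (0:Int) b = 0 := by omega
      by_cases hb0 : b = 0 <;> simp [hb0, hm, rep10]
    · -- b = 0 : result is "0"*a
      have hm : min a (0:Int) = 0 := by omega
      by_cases ha0 : a = 0 <;> simp [ha0, hm, rep10]
  · have hA : a ≠ 0 := by omega
    have hB : b ≠ 0 := by omega
    simp only [if_neg (by omega : ¬ (a = 0 ∨ b = 0))]
    by_cases hba : b ≤ a
    · -- b = min: loop ends "…1", the pending '0' is supplied by the "0"*(a-b+1) suffix
      have hm : min a b = b := by omega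
      have hne : a - (b - 1) ≠ 0 := by omega
      simp only [hba, if_pos, hne, ne_eq, not_false_eq_true, hm]
      have h1 : (a - (b - 1)).toNat = (a - b).toNat + 1 := by omega
      have h2 : rep10 b.toNat = rep10 (b - 1).toNat ++ ['1', '0'] := by
        have : b.toNat = (b - 1).toNat + 1 := by omega
        rw [this, rep10_succ_append]
      simp [h1, h2, List.replicate_succ]
    · -- a = min: loop ends after a full pairs, "1"*(b-a) follows
      have hm : min a b = a := by omega
      simp only [hba, if_false, hm, if_pos (by omega : b - a ≠ 0)]
      simp
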